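-- pv_equiv track=rewrite | github.com/aryaarawat/syncode-bibtex | bibtex_syncode.py | _type_and_key_from_prefix
-- ===== SOURCE A (Python) =====
-- def _type_and_key_from_prefix(prefix: str):
--     """Parse prefix like '\\n\\n@inproceedings{smith_johnson_conf,\\n  author = {' -> ('inproceedings', 'smith_johnson_conf')."""
--     if not prefix or "@" not in prefix:
--         return None, None
--     i = prefix.index("@") + 1
--     j = i
--     while j < len(prefix) and prefix[j] not in "{(":
--         j += 1
--     if j >= len(prefix):
--         return None, None
--     entry_type = prefix[i:j].strip()
--     delim = prefix[j]
--     j += 1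
--     k = j
--     while k < len(prefix) and prefix[k] not in ",}":
--         k += 1
--     key = prefix[j:k].strip()
--     return entry_type or None, key or None
-- ===== SOURCE B (Python) =====
-- def _type_and_key_from_prefix(prefix: str):
--     # Single-pass character state machine: 0 = before '@', 1 = reading the
--     # entry type, 2 = reading the key (stops at ',' or '}').
--     state = 0
--     type_chars = []
--     key_chars = []
--     for c in prefix:
--         if state == 0:
--             if c == '@':
--                 state = 1
--         elif state == 1:
--             if c in '{(':
--                 state = 2
--             else:
--                 type_chars.append(c)
--         else:
--             if c in ',}':
--                 break
--             key_chars.append(c)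
--     if state != 2:
--         return None, None
--     entry_type = ''.join(type_chars).strip()
--     key = ''.join(key_chars).strip()
--     return entry_type or None, key or None
-- ===== Notes on version B (the rewrite author's own statement) =====
-- stated objective: alternative
-- what changed: Replaced A's staged scanning with explicit i/j/k cursors and while loops over positions by a single for-loop over the characters driven by an explicit 3-state machine (before '@' / reading type / reading key) with list accumulators and a break.
import Mathlib
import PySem

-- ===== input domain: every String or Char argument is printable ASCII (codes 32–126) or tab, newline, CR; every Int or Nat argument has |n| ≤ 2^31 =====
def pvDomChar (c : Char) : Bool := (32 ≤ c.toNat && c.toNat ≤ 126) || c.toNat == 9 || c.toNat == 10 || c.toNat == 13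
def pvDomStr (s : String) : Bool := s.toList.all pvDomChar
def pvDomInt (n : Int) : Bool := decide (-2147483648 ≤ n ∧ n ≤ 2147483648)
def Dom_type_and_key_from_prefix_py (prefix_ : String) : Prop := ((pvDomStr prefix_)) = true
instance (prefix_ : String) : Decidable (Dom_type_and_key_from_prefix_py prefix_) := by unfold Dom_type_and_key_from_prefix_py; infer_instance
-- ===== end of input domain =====

-- B replaces A's staged index scans (i/j/k cursors and while loops) by one pass over the
-- characters with an explicit 3-state machine and accumulators (alternative; same cost).

-- ===== PORT A =====
-- while j < len(prefix) and prefix[j] not in stop: j += 1   (returns the final cursor)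
def pvScan (s : List Char) (stop : List Char) (j : Nat) : Nat :=
  if h : j < s.length then
    if s[j] ∈ stop then j else pvScan s stop (j + 1)
  else j
termination_by s.length - j

def type_and_key_from_prefix_py (prefix_ : String) : Option String × Option String :=
  let s := prefix_.toList
  if s = [] ∨ '@' ∉ s then (none, none)
  else
    let i := s.idxOf '@' + 1
    let j := pvScan s ['{', '('] i
    if j ≥ s.length then (none, none)
    else
      let entry_type := PySem.Chars.strip ((s.drop i).take (j - i))
      let j' := j + 1
      let k := pvScan s [',', '}'] j'
      let key := PySem.Chars.strip ((s.drop j').take (k - j'))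
      ((if entry_type = [] then none else some (String.mk entry_type)),
       (if key = [] then none else some (String.mk key)))

-- ===== PORT B =====
-- the for-loop of Source B: state 0 = before '@', 1 = reading type chars, 2 = reading key chars;
-- returns the final (state, type_chars, key_chars) (the ',' / '}' branch is the `break`)
def pvStep : List Char → Nat → List Char → List Char → Nat × List Char × List Char
  | [], st, t, k => (st, t, k)
  | c :: rest, st, t, k =>
    if st = 0 then pvStep rest (if c = '@' then 1 else 0) t k
    else if st = 1 then
      if c = '{' ∨ c = '(' then pvStep rest 2 t k
      else pvStep rest 1 (t ++ [c]) k
    else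
      if c = ',' ∨ c = '}' then (2, t, k)
      else pvStep rest 2 t (k ++ [c])

def type_and_key_from_prefix_py_alt (prefix_ : String) : Option String × Option String :=
  let r := pvStep prefix_.toList 0 [] []
  if r.1 ≠ 2 then (none, none)
  else
    let entry_type := PySem.Chars.strip r.2.1
    let key := PySem.Chars.strip r.2.2
    ((if entry_type = [] then none else some (String.mk entry_type)),
     (if key = [] then none else some (String.mk key)))

-- ===== PRECONDITION & SPEC =====
def Spec_type_and_key_from_prefix_py (prefix_ : String) (out : Option String × Option String) : Prop := out = type_and_key_from_prefix_py_alt prefix_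
instance (prefix_ : String) (out : Option String × Option String) : Decidable (Spec_type_and_key_from_prefix_py prefix_ out) := by unfold Spec_type_and_key_from_prefix_py; infer_instance

-- ===== CLAIM (what is proved, stated in full; the proofs are below) =====
def Claim_equal_type_and_key_from_prefix_py : Prop := ∀ (prefix_ : String), Dom_type_and_key_from_prefix_py prefix_ → Spec_type_and_key_from_prefix_py prefix_ (type_and_key_from_prefix_py prefix_)

-- ===== LEMMAS AND PROOFS =====

-- proof-only middle form: split at the first '@', takeWhile to the delimiter, takeWhile to the end of the key
def pvTakeForm (prefix_ : String) : Option String × Option String :=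
  let s := prefix_.toList
  if '@' ∉ s then (none, none)
  else
    let rest := (s.dropWhile (fun c => c ≠ '@')).tail
    let head := rest.takeWhile (fun c => c ≠ '{' ∧ c ≠ '(')
    if head.length = rest.length then (none, none)
    else
      let after := rest.drop (head.length + 1)
      let key := PySem.Chars.strip (after.takeWhile (fun c => c ≠ ',' ∧ c ≠ '}'))
      let et := PySem.Chars.strip head
      ((if et = [] then none else some (String.mk et)),
       (if key = [] then none else some (String.mk key)))

-- the scanning loop lands at j + length of the takewhile of the suffix from j
theorem pvScan_eq (s stop : List Char) (j : Nat) :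
    pvScan s stop j = j + ((s.drop j).takeWhile (fun c => !stop.contains c)).length := by
  rw [pvScan]
  split
  · rename_i h
    have hdrop : s.drop j = s[j] :: s.drop (j + 1) := List.drop_eq_getElem_cons h
    by_cases hm : s[j] ∈ stop
    · rw [if_pos hm, hdrop]
      simp [List.takeWhile, hm]
    · rw [if_neg hm, pvScan_eq s stop (j + 1), hdrop]
      simp [List.takeWhile, hm]
      omega
  · rename_i h
    rw [List.drop_eq_nil_of_le (by omega)]
    simp
termination_by s.length - j

theorem take_takeWhile_length {α : Type} (p : α → Bool) (l : List α) :
    l.take ((l.takeWhile p).length) = l.takeWhile p := by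
  induction l with
  | nil => simp
  | cons a t ih => by_cases h : p a <;> simp [List.takeWhile, h, ih]

-- after the first '@': drop (idxOf+1) is the tail of the dropWhile, and idxOf is in range
theorem drop_idxOf_succ (s : List Char) (h : '@' ∈ s) :
    s.drop (s.idxOf '@' + 1) = (s.dropWhile (fun c => c ≠ '@')).tail ∧ s.idxOf '@' < s.length := by
  induction s with
  | nil => simp at h
  | cons a t ih =>
    by_cases ha : a = '@'
    · subst ha; simp [List.dropWhile]
    · have ht : '@' ∈ t := by
        rcases List.mem_cons.mp h with h1 | h1
        · exact absurd h1.symm ha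
        · exact h1
      have := ih ht
      simp only [List.idxOf_cons, List.dropWhile]
      have hbeq : (a == '@') = false := by simpa using ha
      simp [hbeq, ha, this.1, Nat.succ_lt_succ this.2]

-- A equals the middle form (cursor arithmetic ↔ takeWhile)
theorem pvA_eq_takeForm (prefix_ : String) :
    type_and_key_from_prefix_py prefix_ = pvTakeForm prefix_ := by
  unfold type_and_key_from_prefix_py pvTakeForm
  simp only []
  set s := prefix_.toList with hs
  by_cases hat : '@' ∈ s
  · have hne : ¬ (s = [] ∨ '@' ∉ s) := by
      rintro (h1 | h1)
      · exact List.ne_nil_of_mem hat h1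
      · exact h1 hat
    rw [if_neg hne, if_neg (show ¬ ('@' ∉ s) from not_not_intro hat)]
    obtain ⟨hrest, hidx⟩ := drop_idxOf_succ s hat
    set i := s.idxOf '@' + 1 with hi
    have hile : i ≤ s.length := hidx
    set rest := (s.dropWhile (fun c => c ≠ '@')).tail with hrdef
    have hdropi : s.drop i = rest := hrest
    have hlenrest : rest.length = s.length - i := by
      rw [← hdropi, List.length_drop]
    have hp1 : (fun c => !(['{', '('].contains c)) = (fun c : Char => decide (c ≠ '{' ∧ c ≠ '(')) := by
      funext c
      by_cases h1 : c = '{' <;> by_cases h2 : c = '(' <;> simp [h1, h2]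
    have hp2 : (fun c => !([',', '}'].contains c)) = (fun c : Char => decide (c ≠ ',' ∧ c ≠ '}')) := by
      funext c
      by_cases h1 : c = ',' <;> by_cases h2 : c = '}' <;> simp [h1, h2]
    set head := rest.takeWhile (fun c : Char => decide (c ≠ '{' ∧ c ≠ '(')) with hhead
    have hj : pvScan s ['{', '('] i = i + head.length := by
      rw [pvScan_eq, hdropi, hp1]
    have hhle : head.length ≤ rest.length := (List.takeWhile_prefix _).length_le
    clear_value s i rest head
    by_cases hdone : head.length = rest.length
    · rw [if_pos (show pvScan s ['{', '('] i ≥ s.length by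
        rw [hj, hdone, hlenrest, Nat.add_sub_cancel' hile]), if_pos hdone]
    · have hlt : head.length < rest.length := lt_of_le_of_ne hhle hdone
      have hlt' : head.length < s.length - i := hlenrest ▸ hlt
      have hlt'' : i + head.length < s.length := by
        have h2 := Nat.add_lt_add_left hlt' i
        rwa [Nat.add_sub_cancel' hile] at h2
      rw [if_neg (show ¬ pvScan s ['{', '('] i ≥ s.length by
        rw [hj]; exact Nat.not_le.mpr hlt''), if_neg hdone]
      have htake : (s.drop i).take (pvScan s ['{', '('] i - i) = head := by
        rw [hj, hdropi, Nat.add_sub_cancel_left, hhead, take_takeWhile_length]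
      have hafter : s.drop (pvScan s ['{', '('] i + 1) = rest.drop (head.length + 1) := by
        rw [hj, ← hdropi, List.drop_drop, Nat.add_assoc]
      have htake2 : (s.drop (pvScan s ['{', '('] i + 1)).take
          (pvScan s [',', '}'] (pvScan s ['{', '('] i + 1) - (pvScan s ['{', '('] i + 1))
          = (rest.drop (head.length + 1)).takeWhile (fun c : Char => decide (c ≠ ',' ∧ c ≠ '}')) := by
        rw [pvScan_eq s [',', '}'] (pvScan s ['{', '('] i + 1), Nat.add_sub_cancel_left,
          hafter, hp2, take_takeWhile_length]
      rw [htake, htake2]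
  · have h1 : s = [] ∨ '@' ∉ s := Or.inr hat
    rw [if_pos h1, if_pos hat]

-- state 2 of the machine: accumulate the takeWhile of the remaining characters
theorem pvStep_state2 (rest t k : List Char) :
    pvStep rest 2 t k = (2, t, k ++ rest.takeWhile (fun c => c ≠ ',' ∧ c ≠ '}')) := by
  induction rest generalizing k with
  | nil => simp [pvStep]
  | cons c r ih =>
    by_cases hc : c = ',' ∨ c = '}'
    · have : ¬ (c ≠ ',' ∧ c ≠ '}') := by tauto
      simp [pvStep, hc, List.takeWhile, this]
    · have hc' : (c ≠ ',' ∧ c ≠ '}') := by tauto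
      simp [pvStep, hc, List.takeWhile, hc', ih]

-- state 1: collect the head up to the delimiter, then run state 2 (or stop in state 1)
theorem pvStep_state1 (rest t k : List Char) :
    pvStep rest 1 t k =
      (let head := rest.takeWhile (fun c => c ≠ '{' ∧ c ≠ '(')
       if head.length = rest.length then (1, t ++ head, k)
       else (2, t ++ head, k ++ (rest.drop (head.length + 1)).takeWhile (fun c => c ≠ ',' ∧ c ≠ '}'))) := by
  induction rest generalizing t with
  | nil => simp [pvStep]
  | cons c r ih =>
    by_cases hc : c = '{' ∨ c = '('
    · have hnc : decide (c ≠ '{' ∧ c ≠ '(') = false := by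
        simp only [decide_eq_false_iff_not]; tauto
      simp only [pvStep, hc, if_true, List.takeWhile_cons, hnc, if_false,
        List.length_nil, List.length_cons, reduceIte]
      rw [pvStep_state2]
      have hlen : ¬ ((0 : Nat) = r.length + 1) := by omega
      simp [hlen]
    · have hpc : decide (c ≠ '{' ∧ c ≠ '(') = true := by
        simp only [decide_eq_true_eq]; tauto
      have hone : (1 : Nat) ≠ 0 := by omega
      simp only [pvStep, hone, if_false, hc, List.takeWhile_cons, hpc, if_true, reduceIte]
      rw [ih]
      simp only [List.length_cons]
      by_cases hd : (r.takeWhile (fun c => decide (c ≠ '{' ∧ c ≠ '('))).length = r.length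
      · have hd2 : (r.takeWhile (fun c => decide (c ≠ '{' ∧ c ≠ '('))).length + 1 = r.length + 1 := by omega
        simp [hd, hd2, List.append_assoc]
      · have hd2 : ¬ ((r.takeWhile (fun c => decide (c ≠ '{' ∧ c ≠ '('))).length + 1 = r.length + 1) := by omega
        simp [hd, hd2, List.append_assoc, List.drop_succ_cons]

-- state 0: skip to the first '@' (entering state 1), or finish in state 0
theorem pvStep_state0 (s t k : List Char) :
    pvStep s 0 t k =
      (if '@' ∈ s then pvStep ((s.dropWhile (fun c => c ≠ '@')).tail) 1 t k else (0, t, k)) := by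
  induction s with
  | nil => simp [pvStep]
  | cons c r ih =>
    by_cases hc : c = '@'
    · subst hc; simp [pvStep, List.dropWhile]
    · have hc2 : ¬ ('@' = c) := fun h => hc h.symm
      simp [pvStep, hc, ih, List.dropWhile, List.mem_cons, hc2]

-- B equals the middle form
theorem pvB_eq_takeForm (prefix_ : String) :
    type_and_key_from_prefix_py_alt prefix_ = pvTakeForm prefix_ := by
  unfold type_and_key_from_prefix_py_alt pvTakeForm
  simp only []
  set s := prefix_.toList with hs
  rw [pvStep_state0]
  by_cases hat : '@' ∈ s
  · rw [if_pos hat, if_neg (not_not_intro hat), pvStep_state1]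
    simp only []
    set rest := (s.dropWhile (fun c => c ≠ '@')).tail with hr
    set head := rest.takeWhile (fun c => c ≠ '{' ∧ c ≠ '(') with hh
    by_cases hd : head.length = rest.length
    · simp [hd]
    · simp [hd]
  · rw [if_neg hat, if_pos hat]
    simp

-- ===== VERDICT (by name: the statement is the Claim_ definition above) =====
theorem type_and_key_from_prefix_py_spec : Claim_equal_type_and_key_from_prefix_py := by
  intro prefix_ _
  unfold Spec_type_and_key_from_prefix_py
  rw [pvA_eq_takeForm, pvB_eq_takeForm]
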